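-- pv_equiv track=rewrite | github.com/The-devop/Cipher-Labs | crypto_core.py | fractionated_morse
-- ===== SOURCE A (Python) =====
-- def fractionated_morse(text: str) -> str:
--     """Fractionated Morse Cipher - morse code to fractionation"""
--     morse_dict = {'A': '.-', 'B': '-...', 'C': '-.-.', 'D': '-..', 'E': '.', 'F': '..-.',
--                   'G': '--.', 'H': '....', 'I': '..', 'J': '.---', 'K': '-.-', 'L': '.-..',
--                   'M': '--', 'N': '-.', 'O': '---', 'P': '.--.', 'Q': '--.-', 'R': '.-.',
--                   'S': '...', 'T': '-', 'U': '..-', 'V': '...-', 'W': '.--', 'X': '-..-',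
--                   'Y': '-.--', 'Z': '--..'}
--     morse = ''.join(morse_dict.get(c.upper(), '') for c in text if c.isalpha())
--     return ''.join(chr((ord(morse[i]) - 45) + 65) if i < len(morse) else '' for i in range(0, len(morse), 3))
-- ===== SOURCE B (Python) =====
-- def fractionated_morse(text: str) -> str:
--     """Fractionated Morse Cipher - fused single pass over a compact bit-encoded code table."""
--     # per letter A..Z: (number of morse symbols, bitmask with bit j set = dash at symbol j)
--     MORSE = [(2, 2), (4, 1), (4, 5), (3, 1), (1, 0), (4, 4), (3, 3), (4, 0), (2, 0),
--              (4, 14), (3, 5), (4, 2), (2, 3), (2, 1), (3, 7), (4, 6), (4, 11), (3, 2),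
--              (3, 0), (1, 1), (3, 4), (4, 8), (3, 6), (4, 9), (4, 13), (4, 3)]
--     out = []
--     pos = 0
--     for c in text:
--         if c.isalpha():
--             n, bits = MORSE[ord(c.upper()) - 65]
--             for j in range(n):
--                 if pos % 3 == 0:
--                     out.append('A' if (bits >> j) & 1 else 'B')
--                 pos += 1
--     return ''.join(out)
-- ===== Notes on version B (the rewrite author's own statement) =====
-- stated objective: alternative
-- what changed: B fuses A's two passes into one: instead of building the full concatenated morse string and then taking every 3rd symbol, it walks the text once with a running global morse-position counter, reading each letter's code from a compact (length, dash-bitmask) integer table rather than a dict of morse strings, and emits the mapped letter whenever the counter is divisible by 3.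
import Mathlib
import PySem

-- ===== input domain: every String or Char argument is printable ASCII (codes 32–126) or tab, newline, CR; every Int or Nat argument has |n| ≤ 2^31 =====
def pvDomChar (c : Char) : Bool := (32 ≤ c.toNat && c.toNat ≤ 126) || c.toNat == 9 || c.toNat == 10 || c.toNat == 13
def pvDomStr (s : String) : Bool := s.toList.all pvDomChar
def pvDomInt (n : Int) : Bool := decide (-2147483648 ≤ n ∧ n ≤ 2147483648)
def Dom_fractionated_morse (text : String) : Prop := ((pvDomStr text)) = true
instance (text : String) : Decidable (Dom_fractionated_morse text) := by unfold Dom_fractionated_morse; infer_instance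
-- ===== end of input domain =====

-- B fuses A's two passes into one pass over the text with a running morse-position counter,
-- reading per-letter morse codes from a compact (length, dash-bitmask) table instead of A's
-- dict of '.'/'-' strings; same return value, no intermediate concatenated morse string.


-- ===== PORT A =====
-- the Python dict literal morse_dict (values as char lists; ''-joined strings are List Char here)
def pvMorseDict : PySem.Dict Char (List Char) := ⟨[
  ('A', ['.','-']), ('B', ['-','.','.','.']), ('C', ['-','.','-','.']), ('D', ['-','.','.']),
  ('E', ['.']), ('F', ['.','.','-','.']), ('G', ['-','-','.']), ('H', ['.','.','.','.']),
  ('I', ['.','.']), ('J', ['.','-','-','-']), ('K', ['-','.','-']), ('L', ['.','-','.','.']),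
  ('M', ['-','-']), ('N', ['-','.']), ('O', ['-','-','-']), ('P', ['.','-','-','.']),
  ('Q', ['-','-','.','-']), ('R', ['.','-','.']), ('S', ['.','.','.']), ('T', ['-']),
  ('U', ['.','.','-']), ('V', ['.','.','.','-']), ('W', ['.','-','-']), ('X', ['-','.','.','-']),
  ('Y', ['-','.','-','-']), ('Z', ['-','-','.','.'])]⟩

-- morse_dict.get(c.upper(), '')
def pvCodeOf (c : Char) : List Char := PySem.Dict.getD pvMorseDict (PySem.Chars.upperChar c) []

def fractionated_morse (text : String) : String :=
  -- morse = ''.join(morse_dict.get(c.upper(), '') for c in text if c.isalpha())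
  let morse : List Char := ((text.toList.filter PySem.Chars.isalpha).map pvCodeOf).flatten
  -- ''.join(chr((ord(morse[i]) - 45) + 65) if i < len(morse) else '' for i in range(0, len(morse), 3))
  String.ofList (((PySem.List.pyRange 0 (morse.length : Int) 3).map
      (fun i => if i < (morse.length : Int) then
          match PySem.List.pyGet? morse i with
          | some m => [Char.ofNat ((m.toNat - 45) + 65)]
          | none => []
        else ([] : List Char))).flatten)

-- ===== PORT B =====
-- Source B's MORSE list: per letter A..Z, (number of morse symbols, bitmask with bit j set = dash at symbol j)
def pvMorseTable : List (Nat × Nat) :=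
  [(2, 2), (4, 1), (4, 5), (3, 1), (1, 0), (4, 4), (3, 3), (4, 0), (2, 0),
   (4, 14), (3, 5), (4, 2), (2, 3), (2, 1), (3, 7), (4, 6), (4, 11), (3, 2),
   (3, 0), (1, 1), (3, 4), (4, 8), (3, 6), (4, 9), (4, 13), (4, 3)]

def fractionated_morse_alt (text : String) : String :=
  -- MORSE[ord(c.upper()) - 65]: for an isalpha char the index is always in range, so getD's
  -- default is never taken; inner loop 'for j in range(n)' with the running (pos, out) state
  String.ofList ((text.toList.foldl
    (fun st c =>
      if PySem.Chars.isalpha c then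
        let e := pvMorseTable.getD ((PySem.Chars.upperChar c).toNat - 65) (0, 0)
        (List.range e.1).foldl
          (fun st j =>
            (st.1 + 1,
             if st.1 % 3 = 0 then st.2 ++ [if (e.2 >>> j) % 2 = 1 then 'A' else 'B'] else st.2))
          st
      else st)
    ((0 : Nat), ([] : List Char))).2)

-- ===== PRECONDITION & SPEC =====
def Spec_fractionated_morse (text : String) (out : String) : Prop := out = fractionated_morse_alt text
instance (text : String) (out : String) : Decidable (Spec_fractionated_morse text out) := by unfold Spec_fractionated_morse; infer_instance

-- ===== CLAIM (what is proved, stated in full; the proofs are below) =====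
def Claim_equal_fractionated_morse : Prop := ∀ (text : String), Dom_fractionated_morse text → Spec_fractionated_morse text (fractionated_morse text)

-- ===== LEMMAS AND PROOFS =====

-- every symbol of every morse code in A's table is '-' or '.'
theorem pvCodeOf_chars (c m : Char) (h : m ∈ pvCodeOf c) : m = '-' ∨ m = '.' := by
  unfold pvCodeOf PySem.Dict.getD PySem.Dict.get? at h
  cases hf : List.find? (fun p => p.1 == PySem.Chars.upperChar c) pvMorseDict.items with
  | none => simp [hf] at h
  | some e =>
    rw [hf] at h
    simp only [Option.map_some, Option.getD_some] at h
    have he := List.mem_of_find?_eq_some hf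
    have hall : pvMorseDict.items.all (fun e => e.2.all (fun m => m == '-' || m == '.')) = true := by
      rfl
    have h1 := List.all_eq_true.mp (List.all_eq_true.mp hall e he) m h
    simpa using h1

-- reference step over one morse symbol char (the shape both sides are reduced to)
def pvStepB (st : Nat × List Char) (m : Char) : Nat × List Char :=
  (st.1 + 1, if st.1 % 3 = 0 then st.2 ++ [if m = '-' then 'A' else 'B'] else st.2)

-- the emitted letters of the fused pass, as a function of the global morse position p
def pvStride (p : Nat) : List Char → List Char
  | [] => []
  | m :: ms => (if p % 3 = 0 then [if m = '-' then 'A' else 'B'] else []) ++ pvStride (p+1) ms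

theorem pvStride_nil (p : Nat) : pvStride p [] = [] := rfl

theorem pvStride_cons (p : Nat) (m : Char) (ms : List Char) :
    pvStride p (m :: ms) = (if p % 3 = 0 then [if m = '-' then 'A' else 'B'] else []) ++ pvStride (p+1) ms := rfl

theorem pvStepB_foldl (code : List Char) (p : Nat) (acc : List Char) :
    code.foldl pvStepB (p, acc) = (p + code.length, acc ++ pvStride p code) := by
  induction code generalizing p acc with
  | nil => simp only [List.foldl_nil, List.length_nil, Nat.add_zero, pvStride_nil, List.append_nil]
  | cons m ms ih =>
    simp only [List.foldl_cons, pvStepB, pvStride_cons, ih, List.length_cons, Prod.mk.injEq]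
    constructor
    · omega
    · split <;> simp

-- the symbol chars encoded by one (length, bitmask) table entry
def pvDecode (n bits : Nat) : List Char :=
  (List.range n).map (fun j => if (bits >>> j) % 2 = 1 then '-' else '.')

-- B's inner bit loop is the pvStepB fold over the decoded symbol list
theorem pvInnerB_eq (n bits : Nat) (st : Nat × List Char) :
    (List.range n).foldl
      (fun st j =>
        (st.1 + 1,
         if st.1 % 3 = 0 then st.2 ++ [if (bits >>> j) % 2 = 1 then 'A' else 'B'] else st.2))
      st
    = (pvDecode n bits).foldl pvStepB st := by
  unfold pvDecode
  rw [List.foldl_map]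
  congr 1
  funext st' j
  unfold pvStepB
  by_cases hb : (bits >>> j) % 2 = 1 <;> simp [hb]

-- decoding B's table entry for an alphabetic char gives exactly A's morse code string
theorem pvDecode_table_lt : ∀ n < 123, PySem.Chars.isalpha (Char.ofNat n) = true →
    pvDecode (pvMorseTable.getD ((PySem.Chars.upperChar (Char.ofNat n)).toNat - 65) (0, 0)).1
             (pvMorseTable.getD ((PySem.Chars.upperChar (Char.ofNat n)).toNat - 65) (0, 0)).2
      = pvCodeOf (Char.ofNat n) := by decide

theorem pvIsalpha_toNat_lt (c : Char) (h : PySem.Chars.isalpha c = true) : c.toNat < 123 := by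
  simp only [PySem.Chars.isalpha, PySem.Chars.isupper, PySem.Chars.islower, Bool.or_eq_true,
    Bool.and_eq_true, decide_eq_true_eq, Char.le_def, UInt32.le_iff_toNat_le] at h
  have hZ : ('Z').val.toNat = 90 := by decide
  have hz : ('z').val.toNat = 122 := by decide
  have hc : c.toNat = c.val.toNat := rfl
  rcases h with ⟨_, h2⟩ | ⟨_, h2⟩ <;> omega

theorem pvDecode_table (c : Char) (h : PySem.Chars.isalpha c = true) :
    pvDecode (pvMorseTable.getD ((PySem.Chars.upperChar c).toNat - 65) (0, 0)).1
             (pvMorseTable.getD ((PySem.Chars.upperChar c).toNat - 65) (0, 0)).2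
      = pvCodeOf c := by
  have hlt := pvIsalpha_toNat_lt c h
  have := pvDecode_table_lt c.toNat hlt
  rw [Char.ofNat_toNat] at this
  exact this h

theorem pvStride_append (l₁ l₂ : List Char) (p : Nat) :
    pvStride p (l₁ ++ l₂) = pvStride p l₁ ++ pvStride (p + l₁.length) l₂ := by
  induction l₁ generalizing p with
  | nil => simp [pvStride_nil]
  | cons m ms ih =>
    simp only [List.cons_append, pvStride_cons, ih, List.length_cons]
    rw [List.append_assoc]
    ring_nf

-- the concatenated morse string of a character list
def pvMorseOf (cs : List Char) : List Char :=
  cs.flatMap (fun c => if PySem.Chars.isalpha c then pvCodeOf c else [])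

-- B's outer fold, after pvInnerB_eq/pvDecode_table have turned its body into pvStepB folds
theorem pvOuter_foldl (cs : List Char) (p : Nat) (acc : List Char) :
    cs.foldl (fun st c => if PySem.Chars.isalpha c then (pvCodeOf c).foldl pvStepB st else st) (p, acc)
      = (p + (pvMorseOf cs).length, acc ++ pvStride p (pvMorseOf cs)) := by
  induction cs generalizing p acc with
  | nil => simp [pvMorseOf, pvStride_nil]
  | cons c cs ih =>
    simp only [List.foldl_cons, pvMorseOf, List.flatMap_cons]
    by_cases ha : PySem.Chars.isalpha c
    · simp only [ha, if_true, pvStepB_foldl, ih, pvStride_append, List.length_append,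
        Prod.mk.injEq]
      rw [show List.flatMap (fun c => if PySem.Chars.isalpha c = true then pvCodeOf c else []) cs
          = pvMorseOf cs from rfl]
      constructor
      · omega
      · rw [List.append_assoc]
    · simp only [ha, ih]
      simp [pvMorseOf]

-- B's actual outer fold body equals the pvStepB-fold body
theorem pvAltBody_eq :
    (fun (st : Nat × List Char) (c : Char) =>
      if PySem.Chars.isalpha c then
        let e := pvMorseTable.getD ((PySem.Chars.upperChar c).toNat - 65) (0, 0)
        (List.range e.1).foldl
          (fun st j =>
            (st.1 + 1,
             if st.1 % 3 = 0 then st.2 ++ [if (e.2 >>> j) % 2 = 1 then 'A' else 'B'] else st.2))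
          st
      else st)
    = (fun st c => if PySem.Chars.isalpha c then (pvCodeOf c).foldl pvStepB st else st) := by
  funext st c
  by_cases ha : PySem.Chars.isalpha c
  · simp only [ha, if_true]
    rw [pvInnerB_eq, pvDecode_table c ha]
  · simp [ha]

theorem pvFlattenFilterMap (cs : List Char) :
    ((cs.filter PySem.Chars.isalpha).map pvCodeOf).flatten = pvMorseOf cs := by
  induction cs with
  | nil => simp [pvMorseOf]
  | cons c cs ih =>
    by_cases ha : PySem.Chars.isalpha c <;>
      simp [pvMorseOf, List.flatMap_cons, ha] at * <;> rw [ih]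

theorem pvStride_add_three (l : List Char) (p : Nat) : pvStride (p + 3) l = pvStride p l := by
  induction l generalizing p with
  | nil => simp [pvStride]
  | cons m ms ih =>
    simp only [pvStride, Nat.add_mod_right]
    rw [show p + 3 + 1 = (p + 1) + 3 by omega, ih]

theorem pvStride_cons3 (a : Char) (rest : List Char) :
    pvStride 0 (a :: rest) = (if a = '-' then 'A' else 'B') :: pvStride 0 (rest.drop 2) := by
  match rest with
  | [] => simp [pvStride]
  | [b] => simp [pvStride]
  | b :: c :: r =>
    show pvStride 0 (a :: b :: c :: r) = _
    simp only [pvStride, List.drop_succ_cons, List.drop_zero]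
    norm_num
    exact pvStride_add_three r 0

-- A's second pass, as a function of the morse char list
def pvStrideA (l : List Char) : List Char :=
  (List.range ((l.length + 2)/3)).map (fun k => Char.ofNat (((l.getD (3*k) 'A').toNat - 45) + 65))

theorem pvStrideA_cons3 (a : Char) (rest : List Char) :
    pvStrideA (a :: rest) = Char.ofNat ((a.toNat - 45) + 65) :: pvStrideA (rest.drop 2) := by
  unfold pvStrideA
  have hlen : ((a :: rest).length + 2) / 3 = rest.length / 3 + 1 := by
    simp only [List.length_cons]; omega
  have hlen2 : ((rest.drop 2).length + 2) / 3 = rest.length / 3 := by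
    simp only [List.length_drop]; omega
  rw [hlen, hlen2, List.range_succ_eq_map, List.map_cons, List.map_map]
  congr 1
  apply List.map_congr_left
  intro k _
  simp only [Function.comp_apply, Nat.succ_eq_add_one, List.getD_eq_getElem?_getD,
    List.getElem?_drop]
  rw [show 3 * (k + 1) = (2 + 3 * k) + 1 by omega]
  simp [List.getElem?_cons_succ]

theorem pvStrideA_eq_pvStride : ∀ (n : Nat) (l : List Char), l.length ≤ n →
    (∀ m ∈ l, m = '-' ∨ m = '.') → pvStrideA l = pvStride 0 l := by
  intro n
  induction n with
  | zero =>
    intro l hl _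
    have : l = [] := List.eq_nil_of_length_eq_zero (by omega)
    subst this; rfl
  | succ n ih =>
    intro l hl hchars
    match l with
    | [] => rfl
    | a :: rest =>
      rw [pvStrideA_cons3, pvStride_cons3]
      have hhead : Char.ofNat ((a.toNat - 45) + 65) = (if a = '-' then 'A' else 'B') := by
        rcases hchars a (by simp) with h | h <;> subst h <;> decide
      rw [hhead]
      congr 1
      apply ih
      · have := List.length_drop (l := rest) (i := 2)
        simp only [List.length_cons] at hl
        omega
      · intro m hm
        exact hchars m (List.mem_cons_of_mem _ (List.mem_of_mem_drop hm))

theorem pvFlattenSingleton {α β : Type} (f : α → β) (xs : List α) :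
    (xs.map (fun k => [f k])).flatten = xs.map f := by
  induction xs with
  | nil => rfl
  | cons x xs ih => simp [ih]

-- A's pyRange pass equals pvStrideA
theorem pvA_pass_eq (l : List Char) :
    (((PySem.List.pyRange 0 (l.length : Int) 3).map
      (fun i => if i < (l.length : Int) then
          match PySem.List.pyGet? l i with
          | some m => [Char.ofNat ((m.toNat - 45) + 65)]
          | none => []
        else ([] : List Char))).flatten) = pvStrideA l := by
  rw [PySem.List.pyRange_of_pos 0 (l.length : Int) (by norm_num)]
  have hM : (if (0:Int) < (l.length : Int) then (((l.length : Int) - 0 + 3 - 1) / 3).toNat else 0)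
      = (l.length + 2) / 3 := by
    split <;> omega
  rw [hM, List.map_map]
  unfold pvStrideA
  rw [← pvFlattenSingleton (fun k => Char.ofNat (((l.getD (3*k) 'A').toNat - 45) + 65))
      (List.range ((l.length + 2) / 3))]
  congr 1
  apply List.map_congr_left
  intro k hk
  have hk3 : 3 * k < l.length := by
    simp only [List.mem_range] at hk; omega
  have hcast : (0 : Int) + 3 * (k : Int) = ((3 * k : Nat) : Int) := by push_cast; ring
  simp only [Function.comp_apply, hcast, PySem.List.pyGet?_natCast]
  have hlt : ((3 * k : Nat) : Int) < (l.length : Int) := by exact_mod_cast hk3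
  rw [if_pos hlt]
  have : l[3 * k]? = some l[3 * k] := List.getElem?_eq_getElem hk3
  rw [this]
  simp [List.getD_eq_getElem?_getD, this]

-- ===== VERDICT (by name: the statement is the Claim_ definition above) =====
theorem fractionated_morse_spec : Claim_equal_fractionated_morse := by
  intro text _
  unfold Spec_fractionated_morse fractionated_morse fractionated_morse_alt
  rw [pvAltBody_eq]
  simp only [pvOuter_foldl, pvFlattenFilterMap, pvA_pass_eq]
  rw [List.nil_append]
  congr 1
  apply pvStrideA_eq_pvStride (pvMorseOf text.toList).length _ le_rfl
  intro m hm
  simp only [pvMorseOf, List.mem_flatMap] at hm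
  obtain ⟨c, _, hmc⟩ := hm
  by_cases ha : PySem.Chars.isalpha c
  · rw [if_pos ha] at hmc; exact pvCodeOf_chars c m hmc
  · rw [if_neg ha] at hmc; simp at hmc
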